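-- pv_equiv track=rewrite | github.com/wh1teone/Automox-SentinelOne-Agent-Comparison | main.py | automox_sentinelone_compare_site_lists
-- ===== SOURCE A (Python) =====
-- def automox_sentinelone_compare_site_lists(sentinelone_orgname_orgid_dict,automox_orgname_orgid_dict):
--     """
--     after getting the list of sentinelone and automox's orgname_orgid dicts and:
--      1. create two new dicts including only values of sites that are in both systems; will be used for the endpoint comparison later on.
--      2. create a dict of sites only found in Automox; for the analyst to review, if necessary.
--      3. creates a dict of sites only found in SentinelOne; for the analyst to review, if necessary.
--     :return: sentinelone and automox site dicts existing in both platforms, site dict only in automox, site dict only in sentinelone.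
--     """
--     both_platform_automox_site_dict = {}
--     both_platform_sentinelone_site_dict = {}
--     automox_only_site_dict = {}
--     sentinelone_only_site_dict = {}
--     for s1_site_name in sentinelone_orgname_orgid_dict.keys(): #we start with the comparison with sentinelone because more clients have s1 only than automox only.
--         if s1_site_name in automox_orgname_orgid_dict.keys():
--             both_platform_sentinelone_site_dict[s1_site_name] = {"site id" : sentinelone_orgname_orgid_dict[s1_site_name]['site id'], "account id": sentinelone_orgname_orgid_dict[s1_site_name]['account id']}
--             both_platform_automox_site_dict[s1_site_name] = automox_orgname_orgid_dict[s1_site_name]['site id']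
--         else:
--             sentinelone_only_site_dict[s1_site_name] = {"site id" : sentinelone_orgname_orgid_dict[s1_site_name]['site id'], "account id": sentinelone_orgname_orgid_dict[s1_site_name]['account id']}
--     for automox_site_name in automox_orgname_orgid_dict.keys():
--         if automox_site_name not in sentinelone_orgname_orgid_dict.keys():
--             automox_only_site_dict[automox_site_name] = automox_orgname_orgid_dict[automox_site_name]['site id']
--     return both_platform_sentinelone_site_dict, both_platform_automox_site_dict, sentinelone_only_site_dict, automox_only_site_dict
-- ===== SOURCE B (Python) =====
-- def automox_sentinelone_compare_site_lists(sentinelone_orgname_orgid_dict, automox_orgname_orgid_dict):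
--     # Merge-join: build ONE merged map name -> (s1 info or None, automox info or None),
--     # then dispatch each merged entry to its partition in a single pass (no membership tests).
--     merged = {}
--     for name, info in sentinelone_orgname_orgid_dict.items():
--         merged[name] = (info, None)
--     for name, info in automox_orgname_orgid_dict.items():
--         prev = merged.get(name)
--         merged[name] = (prev[0] if prev else None, info)
--     both_platform_sentinelone_site_dict = {}
--     both_platform_automox_site_dict = {}
--     sentinelone_only_site_dict = {}
--     automox_only_site_dict = {}
--     for name, (s, a) in merged.items():
--         if s is not None and a is not None:
--             both_platform_sentinelone_site_dict[name] = {"site id": s["site id"], "account id": s["account id"]}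
--             both_platform_automox_site_dict[name] = a["site id"]
--         elif s is not None:
--             sentinelone_only_site_dict[name] = {"site id": s["site id"], "account id": s["account id"]}
--         else:
--             automox_only_site_dict[name] = a["site id"]
--     return (both_platform_sentinelone_site_dict, both_platform_automox_site_dict,
--             sentinelone_only_site_dict, automox_only_site_dict)
-- ===== Notes on version B (the rewrite author's own statement) =====
-- stated objective: alternative
-- what changed: Replaces A's two membership-tested loops with a merge-join: one merged map name -> (sentinelone info or None, automox info or None) built by dict inserts, then a single dispatch pass over the merged items routes each entry to its partition, with no membership tests.
import Mathlib
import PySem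

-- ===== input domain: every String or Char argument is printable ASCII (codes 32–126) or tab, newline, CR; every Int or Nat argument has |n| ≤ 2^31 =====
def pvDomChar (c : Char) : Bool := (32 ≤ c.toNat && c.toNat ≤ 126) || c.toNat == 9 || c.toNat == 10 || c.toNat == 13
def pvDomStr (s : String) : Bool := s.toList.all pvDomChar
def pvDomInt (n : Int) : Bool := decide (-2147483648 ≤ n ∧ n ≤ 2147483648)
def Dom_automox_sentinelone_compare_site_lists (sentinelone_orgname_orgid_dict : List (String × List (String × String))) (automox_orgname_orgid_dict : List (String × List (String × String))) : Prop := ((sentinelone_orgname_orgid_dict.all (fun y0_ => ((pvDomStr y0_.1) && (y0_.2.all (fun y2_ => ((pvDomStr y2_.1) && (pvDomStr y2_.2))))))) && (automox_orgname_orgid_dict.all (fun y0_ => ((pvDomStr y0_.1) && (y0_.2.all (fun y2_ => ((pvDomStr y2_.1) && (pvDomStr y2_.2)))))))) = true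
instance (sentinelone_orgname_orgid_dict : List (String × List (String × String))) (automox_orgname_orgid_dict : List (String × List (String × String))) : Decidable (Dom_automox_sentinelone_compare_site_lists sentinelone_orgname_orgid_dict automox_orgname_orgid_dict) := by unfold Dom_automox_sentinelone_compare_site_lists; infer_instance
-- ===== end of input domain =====

-- ===== PORT A =====
-- B replaces A's two membership-tested loops by a merge-join: one merged map name -> (s1 info?, automox info?)
-- built by dict inserts, then a single dispatch pass over the merged items (objective: alternative).
-- d[k] on an association-list dict: first match (exact: Pre_ keeps keys Nodup), "" / [] unreachable under Pre_
def pvGetS (d : List (String × String)) (k : String) : String := (List.lookup k d).getD ""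
def pvGetD (d : List (String × List (String × String))) (k : String) : List (String × String) := (List.lookup k d).getD []

def automox_sentinelone_compare_site_lists (sentinelone_orgname_orgid_dict : List (String × List (String × String))) (automox_orgname_orgid_dict : List (String × List (String × String))) : (List (String × List (String × String))) × (List (String × String)) × (List (String × List (String × String))) × (List (String × String)) :=
  -- first loop: over sentinelone keys, filling (both_s1, both_am, s1_only) by dict lookups
  let acc := sentinelone_orgname_orgid_dict.foldl
    (fun (st : List (String × List (String × String)) × List (String × String) × List (String × List (String × String)))
         (p : String × List (String × String)) =>
      let k := p.1
      if (automox_orgname_orgid_dict.map Prod.fst).contains k then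
        (st.1 ++ [(k, [("site id", pvGetS (pvGetD sentinelone_orgname_orgid_dict k) "site id"),
                       ("account id", pvGetS (pvGetD sentinelone_orgname_orgid_dict k) "account id")])],
         st.2.1 ++ [(k, pvGetS (pvGetD automox_orgname_orgid_dict k) "site id")],
         st.2.2)
      else
        (st.1, st.2.1,
         st.2.2 ++ [(k, [("site id", pvGetS (pvGetD sentinelone_orgname_orgid_dict k) "site id"),
                         ("account id", pvGetS (pvGetD sentinelone_orgname_orgid_dict k) "account id")])]))
    ([], [], [])
  -- second loop: over automox keys, filling automox_only
  let ao := automox_orgname_orgid_dict.foldl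
    (fun (acc2 : List (String × String)) (p : String × List (String × String)) =>
      if (sentinelone_orgname_orgid_dict.map Prod.fst).contains p.1 then acc2
      else acc2 ++ [(p.1, pvGetS (pvGetD automox_orgname_orgid_dict p.1) "site id")])
    []
  (acc.1, acc.2.1, acc.2.2, ao)

-- ===== PORT B =====
def automox_sentinelone_compare_site_lists_alt (sentinelone_orgname_orgid_dict : List (String × List (String × String))) (automox_orgname_orgid_dict : List (String × List (String × String))) : (List (String × List (String × String))) × (List (String × String)) × (List (String × List (String × String))) × (List (String × String)) :=
  -- merged[name] = (info, None) for the s1 pass, then merged[name] = (prev[0] if prev else None, info) for the automox pass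
  let merged0 : PySem.Dict String (Option (List (String × String)) × Option (List (String × String))) :=
    sentinelone_orgname_orgid_dict.foldl (fun d p => d.insert p.1 (some p.2, none)) PySem.Dict.empty
  let merged :=
    automox_orgname_orgid_dict.foldl (fun d p => d.insert p.1 ((d.get? p.1).bind Prod.fst, some p.2)) merged0
  -- single dispatch pass over merged items, filling the four result dicts
  merged.items.foldl
    (fun (st : List (String × List (String × String)) × List (String × String) × List (String × List (String × String)) × List (String × String))
         (e : String × (Option (List (String × String)) × Option (List (String × String)))) =>
      match e.2 with
      | (some s, some a) =>
          (st.1 ++ [(e.1, [("site id", pvGetS s "site id"), ("account id", pvGetS s "account id")])],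
           st.2.1 ++ [(e.1, pvGetS a "site id")], st.2.2.1, st.2.2.2)
      | (some s, none) =>
          (st.1, st.2.1,
           st.2.2.1 ++ [(e.1, [("site id", pvGetS s "site id"), ("account id", pvGetS s "account id")])], st.2.2.2)
      | (none, a) =>
          -- a is always `some` here (a merged entry has at least one side); .getD [] is unreachable
          (st.1, st.2.1, st.2.2.1, st.2.2.2 ++ [(e.1, pvGetS (a.getD []) "site id")]))
    ([], [], [], [])

-- ===== PRECONDITION & SPEC =====
-- Pre_ says the association lists denote Python dicts (keys at each level Nodup — a Python dict cannot hold
-- duplicate keys, so this excludes no actual Python input) and that the 'site id' / 'account id' keys A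
-- subscripts are present (Python raises KeyError otherwise).
def Pre_automox_sentinelone_compare_site_lists (sentinelone_orgname_orgid_dict : List (String × List (String × String))) (automox_orgname_orgid_dict : List (String × List (String × String))) : Prop :=
  (sentinelone_orgname_orgid_dict.map Prod.fst).Nodup ∧
  (automox_orgname_orgid_dict.map Prod.fst).Nodup ∧
  (∀ p ∈ sentinelone_orgname_orgid_dict,
      (p.2.map Prod.fst).Nodup ∧ "site id" ∈ p.2.map Prod.fst ∧ "account id" ∈ p.2.map Prod.fst) ∧
  (∀ p ∈ automox_orgname_orgid_dict, (p.2.map Prod.fst).Nodup ∧ "site id" ∈ p.2.map Prod.fst)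
instance (sentinelone_orgname_orgid_dict : List (String × List (String × String))) (automox_orgname_orgid_dict : List (String × List (String × String))) : Decidable (Pre_automox_sentinelone_compare_site_lists sentinelone_orgname_orgid_dict automox_orgname_orgid_dict) := by
  unfold Pre_automox_sentinelone_compare_site_lists; infer_instance

def pvWitness_automox_sentinelone_compare_site_lists : (List (String × List (String × String))) × (List (String × List (String × String))) :=
  ([("acme", [("site id", "1"), ("account id", "2")]), ("solo", [("site id", "5"), ("account id", "6")])],
   [("acme", [("site id", "3")]), ("beta", [("site id", "4")])])

def Spec_automox_sentinelone_compare_site_lists (sentinelone_orgname_orgid_dict : List (String × List (String × String))) (automox_orgname_orgid_dict : List (String × List (String × String))) (out : (List (String × List (String × String))) × (List (String × String)) × (List (String × List (String × String))) × (List (String × String))) : Prop := out = automox_sentinelone_compare_site_lists_alt sentinelone_orgname_orgid_dict automox_orgname_orgid_dict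
instance (sentinelone_orgname_orgid_dict : List (String × List (String × String))) (automox_orgname_orgid_dict : List (String × List (String × String))) (out : (List (String × List (String × String))) × (List (String × String)) × (List (String × List (String × String))) × (List (String × String))) : Decidable (Spec_automox_sentinelone_compare_site_lists sentinelone_orgname_orgid_dict automox_orgname_orgid_dict out) := by
  unfold Spec_automox_sentinelone_compare_site_lists
  exact @instDecidableEqProd _ _ inferInstance
    (@instDecidableEqProd _ _ inferInstance (@instDecidableEqProd _ _ inferInstance inferInstance)) _ _

-- ===== CLAIM (what is proved, stated in full; the proofs are below) =====
def Claim_equal_automox_sentinelone_compare_site_lists : Prop := ∀ (sentinelone_orgname_orgid_dict : List (String × List (String × String))) (automox_orgname_orgid_dict : List (String × List (String × String))), Dom_automox_sentinelone_compare_site_lists sentinelone_orgname_orgid_dict automox_orgname_orgid_dict → Pre_automox_sentinelone_compare_site_lists sentinelone_orgname_orgid_dict automox_orgname_orgid_dict → Spec_automox_sentinelone_compare_site_lists sentinelone_orgname_orgid_dict automox_orgname_orgid_dict (automox_sentinelone_compare_site_lists sentinelone_orgname_orgid_dict automox_orgname_orgid_dict)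

-- ===== LEMMAS AND PROOFS =====

-- in a dict (Nodup keys), looking up an item's key returns its value
theorem pv_lookup_self {β : Type} (l : List (String × β)) (h : (l.map Prod.fst).Nodup)
    (p : String × β) (hp : p ∈ l) : List.lookup p.1 l = some p.2 := by
  induction l with
  | nil => cases hp
  | cons q t ih =>
    simp only [List.map_cons, List.nodup_cons] at h
    cases hp with
    | head => simp [List.lookup]
    | tail _ hp =>
      have hne : p.1 ≠ q.1 := by
        intro he; exact h.1 (he ▸ List.mem_map_of_mem hp)
      have hb : (p.1 == q.1) = false := beq_eq_false_iff_ne.mpr hne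
      simp [List.lookup, hb, ih h.2 hp]

-- A's first loop computes the canonical three filter+map passes
theorem pv_loop1 (s1 am : List (String × List (String × String)))
    (l : List (String × List (String × String)))
    (hl : ∀ p ∈ l, List.lookup p.1 s1 = some p.2)
    (bs : List (String × List (String × String))) (ba : List (String × String))
    (so : List (String × List (String × String))) :
    l.foldl
      (fun (st : List (String × List (String × String)) × List (String × String) × List (String × List (String × String)))
           (p : String × List (String × String)) =>
        let k := p.1
        if (am.map Prod.fst).contains k then
          (st.1 ++ [(k, [("site id", pvGetS (pvGetD s1 k) "site id"),
                         ("account id", pvGetS (pvGetD s1 k) "account id")])],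
           st.2.1 ++ [(k, pvGetS (pvGetD am k) "site id")],
           st.2.2)
        else
          (st.1, st.2.1,
           st.2.2 ++ [(k, [("site id", pvGetS (pvGetD s1 k) "site id"),
                           ("account id", pvGetS (pvGetD s1 k) "account id")])]))
      (bs, ba, so) =
    (bs ++ (l.filter (fun p => (am.map Prod.fst).contains p.1)).map
             (fun p => (p.1, [("site id", pvGetS p.2 "site id"), ("account id", pvGetS p.2 "account id")])),
     ba ++ (l.filter (fun p => (am.map Prod.fst).contains p.1)).map
             (fun p => (p.1, pvGetS (pvGetD am p.1) "site id")),
     so ++ (l.filter (fun p => !(am.map Prod.fst).contains p.1)).map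
             (fun p => (p.1, [("site id", pvGetS p.2 "site id"), ("account id", pvGetS p.2 "account id")]))) := by
  induction l generalizing bs ba so with
  | nil => simp
  | cons q t ih =>
    have hq : pvGetD s1 q.1 = q.2 := by
      simp [pvGetD, hl q List.mem_cons_self]
    have ht : ∀ p ∈ t, List.lookup p.1 s1 = some p.2 := fun p hp => hl p (List.mem_cons_of_mem q hp)
    by_cases hc : (am.map Prod.fst).contains q.1
    · simp only [List.foldl_cons, hc, if_true, ih ht, List.filter_cons, Bool.not_true, hq]
      simp
    · have hc' : (am.map Prod.fst).contains q.1 = false := by simpa using hc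
      simp only [List.foldl_cons, hc', ih ht, List.filter_cons, hq]
      simp

-- A's second loop computes the canonical fourth pass
theorem pv_loop2 (s1 am : List (String × List (String × String)))
    (l : List (String × List (String × String)))
    (hl : ∀ p ∈ l, List.lookup p.1 am = some p.2)
    (acc : List (String × String)) :
    l.foldl
      (fun (acc2 : List (String × String)) (p : String × List (String × String)) =>
        if (s1.map Prod.fst).contains p.1 then acc2
        else acc2 ++ [(p.1, pvGetS (pvGetD am p.1) "site id")])
      acc =
    acc ++ (l.filter (fun p => !(s1.map Prod.fst).contains p.1)).map
             (fun p => (p.1, pvGetS p.2 "site id")) := by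
  induction l generalizing acc with
  | nil => simp
  | cons q t ih =>
    have hq : pvGetD am q.1 = q.2 := by
      simp [pvGetD, hl q List.mem_cons_self]
    have ht : ∀ p ∈ t, List.lookup p.1 am = some p.2 := fun p hp => hl p (List.mem_cons_of_mem q hp)
    by_cases hc : (s1.map Prod.fst).contains q.1
    · simp only [List.foldl_cons, hc, if_true, ih ht, List.filter_cons, hq]
      simp
    · have hc' : (s1.map Prod.fst).contains q.1 = false := by simpa using hc
      simp only [List.foldl_cons, hc', ih ht, List.filter_cons, hq]
      simp

-- two entries of a Nodup-keyed list with the same key are equal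
theorem pv_key_inj {β : Type} (l : List (String × β)) (h : (l.map Prod.fst).Nodup)
    (p q : String × β) (hp : p ∈ l) (hq : q ∈ l) (hk : p.1 = q.1) : p = q := by
  have h1 := pv_lookup_self l h p hp
  have h2 := pv_lookup_self l h q hq
  rw [hk, h2] at h1
  exact Prod.ext hk (Option.some_inj.mp h1.symm)

theorem pv_lookup_none_iff {β : Type} (l : List (String × β)) (k : String) :
    List.lookup k l = none ↔ (l.map Prod.fst).contains k = false := by
  rw [List.lookup_eq_none_iff]
  simp [List.mem_map, bne_iff_ne]
  constructor
  · intro h b hb; exact h k b hb rfl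
  · intro h a b hab he; subst he; exact h b hab

-- B's merge loop over the automox items, characterized
theorem pv_merge (s1 : List (String × List (String × String)))
    (hs1 : (s1.map Prod.fst).Nodup)
    (l : List (String × List (String × String)))
    (g : String → Option (List (String × String)))
    (E : List (String × (Option (List (String × String)) × Option (List (String × String)))))
    (d : PySem.Dict String (Option (List (String × String)) × Option (List (String × String))))
    (hd : d.items = s1.map (fun q => (q.1, (some q.2, g q.1))) ++ E)
    (hdk : d.keys.Nodup)
    (hl : (l.map Prod.fst).Nodup)
    (hE : ∀ k ∈ l.map Prod.fst, k ∉ E.map Prod.fst) :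
    (l.foldl (fun d p => d.insert p.1 ((d.get? p.1).bind Prod.fst, some p.2)) d).items
      = s1.map (fun q => (q.1, (some q.2, (List.lookup q.1 l).elim (g q.1) some)))
        ++ E ++ (l.filter (fun p => !(s1.map Prod.fst).contains p.1)).map
                  (fun p => (p.1, ((none : Option (List (String × String))), some p.2))) := by
  induction l generalizing g E d with
  | nil => simpa using hd
  | cons p t ih =>
    simp only [List.map_cons, List.nodup_cons] at hl
    have hkeys : d.keys = s1.map Prod.fst ++ E.map Prod.fst := by
      simp only [PySem.Dict.keys, hd, List.map_append, List.map_map]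
      rfl
    have hEt : ∀ k ∈ t.map Prod.fst, k ∉ E.map Prod.fst :=
      fun k hk => hE k (by simp [hk])
    by_cases hmem : p.1 ∈ s1.map Prod.fst
    · -- key already present from the sentinelone pass: in-place overwrite
      obtain ⟨q0, hq0, hq0k⟩ := List.mem_map.mp hmem
      have hitem : (p.1, ((some q0.2 : Option (List (String × String))), g p.1)) ∈ d.items := by
        rw [hd]
        exact List.mem_append_left _ (List.mem_map.mpr ⟨q0, hq0, by rw [hq0k]⟩)
      have hget : d.get? p.1 = some (some q0.2, g p.1) :=
        PySem.Dict.get?_of_mem_items d hitem hdk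
      have hcon : d.contains p.1 = true := by
        rw [PySem.Dict.contains_iff_mem_keys, hkeys]
        exact List.mem_append_left _ hmem
      have hd' : (d.insert p.1 ((d.get? p.1).bind Prod.fst, some p.2)).items
          = s1.map (fun q => (q.1, (some q.2, (fun x => if x = p.1 then some p.2 else g x) q.1))) ++ E := by
        rw [PySem.Dict.items_insert_of_contains d _ hcon, hd, List.map_append, List.map_map]
        congr 1
        · refine List.map_congr_left (fun q hq => ?_)
          by_cases hqe : q.1 = p.1
          · have hq0e : q = q0 := pv_key_inj s1 hs1 q q0 hq hq0 (by rw [hqe, hq0k])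
            simp [Function.comp, hget, hq0e, hq0k]
          · simp [Function.comp, hqe]
        · have hid : List.map
              (fun r => if (r.1 == p.1) = true then (p.1, ((d.get? p.1).bind Prod.fst, some p.2)) else r) E
              = List.map id E := by
            refine List.map_congr_left (fun r hr => ?_)
            have hne : r.1 ≠ p.1 := by
              intro he
              exact hE p.1 (by simp) (he ▸ List.mem_map_of_mem hr)
            simp [beq_eq_false_iff_ne.mpr hne]
          exact hid.trans (List.map_id E)
      have hdk' : (d.insert p.1 ((d.get? p.1).bind Prod.fst, some p.2)).keys.Nodup := by
        rw [PySem.Dict.keys_insert_of_contains d _ hcon]; exact hdk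
      rw [List.foldl_cons, ih (fun x => if x = p.1 then some p.2 else g x) E _ hd' hdk' hl.2 hEt]
      have hfc : (s1.map Prod.fst).contains p.1 = true := by simpa using hmem
      rw [List.filter_cons]
      simp only [hfc, Bool.not_true]
      congr 1
      congr 1
      refine List.map_congr_left (fun q hq => ?_)
      by_cases hqe : q.1 = p.1
      · have hbe : (q.1 == p.1) = true := beq_iff_eq.mpr hqe
        have hnt : List.lookup p.1 t = none :=
          (pv_lookup_none_iff t p.1).mpr (by simpa using hl.1)
        simp [List.lookup, hnt, hqe]
      · have hbe : (q.1 == p.1) = false := beq_eq_false_iff_ne.mpr hqe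
        simp [List.lookup, hbe, hqe]
    · -- key not seen yet: appended as an automox-only entry
      have hnk : p.1 ∉ d.keys := by
        rw [hkeys]
        simp only [List.mem_append]
        rintro (h1 | h2)
        · exact hmem h1
        · exact hE p.1 (by simp) h2
      have hcon : d.contains p.1 = false := by
        cases hc : d.contains p.1
        · rfl
        · exact absurd ((PySem.Dict.contains_iff_mem_keys d p.1).mp hc) hnk
      have hget : d.get? p.1 = none := (PySem.Dict.get?_eq_none_iff_contains d p.1).mpr hcon
      have hd' : (d.insert p.1 ((d.get? p.1).bind Prod.fst, some p.2)).items
          = s1.map (fun q => (q.1, (some q.2, g q.1)))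
            ++ (E ++ [(p.1, ((none : Option (List (String × String))), some p.2))]) := by
        rw [PySem.Dict.items_insert_of_not_contains d _ hcon, hd, hget, List.append_assoc]
        rfl
      have hdk' : (d.insert p.1 ((d.get? p.1).bind Prod.fst, some p.2)).keys.Nodup := by
        rw [PySem.Dict.keys_insert_of_not_contains d _ hcon]
        refine List.Nodup.append hdk (List.nodup_singleton _) ?_
        intro a ha hb
        rw [List.mem_singleton] at hb
        exact hnk (hb ▸ ha)
      have hEt' : ∀ k ∈ t.map Prod.fst,
          k ∉ (E ++ [(p.1, ((none : Option (List (String × String))), some p.2))]).map Prod.fst := by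
        intro k hk
        simp only [List.map_append, List.mem_append, List.map_cons, List.map_nil,
          List.mem_singleton, not_or]
        exact ⟨hEt k hk, fun he => hl.1 (he ▸ hk)⟩
      rw [List.foldl_cons, ih _ _ _ hd' hdk' hl.2 hEt']
      have hfc : (s1.map Prod.fst).contains p.1 = false := by
        cases hc : (s1.map Prod.fst).contains p.1
        · rfl
        · exact absurd (by simpa using hc) hmem
      rw [List.filter_cons]
      simp only [hfc, Bool.not_false, if_true, List.map_cons]
      have hmc : List.map (fun q => (q.1, ((some q.2 : Option (List (String × String))),
            (List.lookup q.1 t).elim (g q.1) some))) s1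
          = List.map (fun q => (q.1, (some q.2, (List.lookup q.1 (p :: t)).elim (g q.1) some))) s1 := by
        refine List.map_congr_left (fun q hq => ?_)
        have hqe : q.1 ≠ p.1 := fun he => hmem (he ▸ List.mem_map_of_mem hq)
        have hbe : (q.1 == p.1) = false := beq_eq_false_iff_ne.mpr hqe
        simp [List.lookup, hbe]
      rw [hmc]
      simp [List.append_assoc]

-- dispatch pass over the s1 segment of the merged items
theorem pv_disp1 (am : List (String × List (String × String)))
    (s1 : List (String × List (String × String)))
    (b1 b3 : List (String × List (String × String))) (b2 b4 : List (String × String)) :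
    (s1.map (fun q => (q.1, ((some q.2 : Option (List (String × String))), List.lookup q.1 am)))).foldl
      (fun (st : List (String × List (String × String)) × List (String × String) × List (String × List (String × String)) × List (String × String))
           (e : String × (Option (List (String × String)) × Option (List (String × String)))) =>
        match e.2 with
        | (some s, some a) =>
            (st.1 ++ [(e.1, [("site id", pvGetS s "site id"), ("account id", pvGetS s "account id")])],
             st.2.1 ++ [(e.1, pvGetS a "site id")], st.2.2.1, st.2.2.2)
        | (some s, none) =>
            (st.1, st.2.1,
             st.2.2.1 ++ [(e.1, [("site id", pvGetS s "site id"), ("account id", pvGetS s "account id")])], st.2.2.2)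
        | (none, a) =>
            (st.1, st.2.1, st.2.2.1, st.2.2.2 ++ [(e.1, pvGetS (a.getD []) "site id")]))
      (b1, b2, b3, b4)
    = (b1 ++ (s1.filter (fun p => (am.map Prod.fst).contains p.1)).map
               (fun p => (p.1, [("site id", pvGetS p.2 "site id"), ("account id", pvGetS p.2 "account id")])),
       b2 ++ (s1.filter (fun p => (am.map Prod.fst).contains p.1)).map
               (fun p => (p.1, pvGetS (pvGetD am p.1) "site id")),
       b3 ++ (s1.filter (fun p => !(am.map Prod.fst).contains p.1)).map
               (fun p => (p.1, [("site id", pvGetS p.2 "site id"), ("account id", pvGetS p.2 "account id")])),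
       b4) := by
  induction s1 generalizing b1 b2 b3 b4 with
  | nil => simp
  | cons q t ih =>
    rcases h : List.lookup q.1 am with _ | a
    · have hc : (am.map Prod.fst).contains q.1 = false := (pv_lookup_none_iff am q.1).mp h
      simp only [List.map_cons, List.foldl_cons, h, List.filter_cons, hc, Bool.not_false, ih]
      simp
    · have hc : (am.map Prod.fst).contains q.1 = true := by
        cases hcc : (am.map Prod.fst).contains q.1
        · rw [(pv_lookup_none_iff am q.1).mpr hcc] at h; cases h
        · rfl
      have hg : pvGetD am q.1 = a := by simp [pvGetD, h]
      simp only [List.map_cons, List.foldl_cons, h, List.filter_cons, hc, Bool.not_true, ih]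
      simp [hg]

-- dispatch pass over the automox-only segment of the merged items
theorem pv_disp2 (l : List (String × List (String × String)))
    (b1 b3 : List (String × List (String × String))) (b2 b4 : List (String × String)) :
    (l.map (fun p => (p.1, ((none : Option (List (String × String))), some p.2)))).foldl
      (fun (st : List (String × List (String × String)) × List (String × String) × List (String × List (String × String)) × List (String × String))
           (e : String × (Option (List (String × String)) × Option (List (String × String)))) =>
        match e.2 with
        | (some s, some a) =>
            (st.1 ++ [(e.1, [("site id", pvGetS s "site id"), ("account id", pvGetS s "account id")])],
             st.2.1 ++ [(e.1, pvGetS a "site id")], st.2.2.1, st.2.2.2)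
        | (some s, none) =>
            (st.1, st.2.1,
             st.2.2.1 ++ [(e.1, [("site id", pvGetS s "site id"), ("account id", pvGetS s "account id")])], st.2.2.2)
        | (none, a) =>
            (st.1, st.2.1, st.2.2.1, st.2.2.2 ++ [(e.1, pvGetS (a.getD []) "site id")]))
      (b1, b2, b3, b4)
    = (b1, b2, b3, b4 ++ l.map (fun p => (p.1, pvGetS p.2 "site id"))) := by
  induction l generalizing b4 with
  | nil => simp
  | cons q t ih =>
    simp only [List.map_cons, List.foldl_cons, ih]
    simp

-- ===== VERDICT (by name: the statement is the Claim_ definition above) =====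
theorem automox_sentinelone_compare_site_lists_spec : Claim_equal_automox_sentinelone_compare_site_lists := by
  intro s1 am _hdom hpre
  obtain ⟨hn1, hn2, _, _⟩ := hpre
  show automox_sentinelone_compare_site_lists s1 am = automox_sentinelone_compare_site_lists_alt s1 am
  have hb : (s1.foldl (fun d p => d.insert p.1 ((some p.2 : Option (List (String × String))),
        (none : Option (List (String × String))))) PySem.Dict.empty).items
      = s1.map (fun p => (p.1, (some p.2, none))) := by
    rw [PySem.Dict.items_foldl_insert_fresh s1 Prod.fst
        (fun p => (some p.2, none)) PySem.Dict.empty (fun a _ => by simp) hn1]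
    simp [PySem.Dict.empty]
  have hk0 : (s1.foldl (fun d p => d.insert p.1 ((some p.2 : Option (List (String × String))),
        (none : Option (List (String × String))))) PySem.Dict.empty).keys.Nodup := by
    simp only [PySem.Dict.keys, hb, List.map_map]
    exact hn1
  have hm := pv_merge s1 hn1 am (fun _ => none) [] _ (by rw [hb]; simp) hk0 hn2 (by simp)
  have he : ∀ (o : Option (List (String × String))),
      o.elim (none : Option (List (String × String))) some = o := fun o => by cases o <;> rfl
  simp only [he, List.append_nil] at hm
  simp only [automox_sentinelone_compare_site_lists, automox_sentinelone_compare_site_lists_alt]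
  rw [pv_loop1 s1 am s1 (fun p hp => pv_lookup_self s1 hn1 p hp),
      pv_loop2 s1 am am (fun p hp => pv_lookup_self am hn2 p hp), hm, List.foldl_append,
      pv_disp1, pv_disp2]
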